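-- pv_equiv track=rewrite | github.com/sgriffin53/rockbusters | scraper.py | acceptable_name
-- ===== SOURCE A (Python) =====
-- def acceptable_name(name):
--     name = name.lower()
--     for letter in name:
--         match = False
--         if (letter >= 'a' and letter <= 'z') or letter == ' ':
--             match = True
--         if not match: return False
--     return True
-- ===== SOURCE B (Python) =====
-- def acceptable_name(name):
--     stripped = name.replace(' ', '')
--     return stripped == '' or stripped.isalpha()
-- ===== Notes on version B (the rewrite author's own statement) =====
-- stated objective: idiomatic
-- what changed: Instead of lowercasing and scanning characters with a flag and early return, B deletes spaces with str.replace and then asks the library predicate str.isalpha (accepting the empty remainder), i.e. a staged transform-then-classify pipeline with no explicit loop or lowercasing.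
import Mathlib
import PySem

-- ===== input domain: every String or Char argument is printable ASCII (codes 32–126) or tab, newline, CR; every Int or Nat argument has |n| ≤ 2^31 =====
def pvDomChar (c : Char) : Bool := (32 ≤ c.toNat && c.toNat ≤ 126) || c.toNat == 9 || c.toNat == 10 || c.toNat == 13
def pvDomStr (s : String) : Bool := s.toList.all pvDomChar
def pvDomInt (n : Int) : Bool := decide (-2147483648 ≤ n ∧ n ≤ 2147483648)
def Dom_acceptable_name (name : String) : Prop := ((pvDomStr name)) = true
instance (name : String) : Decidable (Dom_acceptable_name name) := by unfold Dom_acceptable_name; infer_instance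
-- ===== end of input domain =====

-- B replaces A's lowercase-and-scan flag loop by a staged pipeline: delete spaces with str.replace, then classify the remainder with str.isalpha (objective: idiomatic; equal on the ASCII domain).


-- ===== PORT A =====
-- the for-loop with the `match` flag and the early `return False`
def acceptable_name_loop : List Char → Bool
  | [] => true
  | letter :: rest =>
    let m : Bool := false
    let m : Bool := if (decide ('a' ≤ letter) && decide (letter ≤ 'z')) || letter == ' ' then true else m
    if !m then false else acceptable_name_loop rest

def acceptable_name (name : String) : Bool :=
  acceptable_name_loop (PySem.Str.lower name).toList

-- ===== PORT B =====
def acceptable_name_alt (name : String) : Bool :=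
  let stripped := PySem.Str.replace name " " ""
  (stripped == "") || PySem.Str.strIsalpha stripped

-- ===== PRECONDITION & SPEC =====
def Spec_acceptable_name (name : String) (out : Bool) : Prop := out = acceptable_name_alt name
instance (name : String) (out : Bool) : Decidable (Spec_acceptable_name name out) := by unfold Spec_acceptable_name; infer_instance

-- ===== CLAIM (what is proved, stated in full; the proofs are below) =====
def Claim_equal_acceptable_name : Prop := ∀ (name : String), Dom_acceptable_name name → Spec_acceptable_name name (acceptable_name name)

-- ===== LEMMAS AND PROOFS =====

theorem char_le_iff (a b : Char) : a ≤ b ↔ a.toNat ≤ b.toNat := Iff.rfl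

-- A's per-character test on the lowercased character equals "alphabetic or space" on the original
theorem lowerChar_cond (c : Char) :
    ((decide ('a' ≤ PySem.Chars.lowerChar c) && decide (PySem.Chars.lowerChar c ≤ 'z')) || (PySem.Chars.lowerChar c == ' '))
      = (PySem.Chars.isalpha c || (c == ' ')) := by
  simp only [PySem.Chars.lowerChar, PySem.Chars.isalpha, PySem.Chars.isupper, PySem.Chars.islower]
  by_cases h : ('A' ≤ c ∧ c ≤ 'Z')
  · have h1 : 65 ≤ c.toNat := h.1
    have h2 : c.toNat ≤ 90 := h.2
    have ht : (Char.ofNat (c.toNat + 32)).toNat = c.toNat + 32 := by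
      rw [Char.toNat_ofNat, if_pos (Or.inl (by omega))]
    have d1 : decide ('A' ≤ c) = true := decide_eq_true h.1
    have d2 : decide (c ≤ 'Z') = true := decide_eq_true h.2
    have e1 : decide ('a' ≤ Char.ofNat (c.toNat + 32)) = true :=
      decide_eq_true (by rw [char_le_iff, ht]; show 97 ≤ c.toNat + 32; omega)
    have e2 : decide (Char.ofNat (c.toNat + 32) ≤ 'z') = true :=
      decide_eq_true (by rw [char_le_iff, ht]; show c.toNat + 32 ≤ 122; omega)
    have e3 : (Char.ofNat (c.toNat + 32) == ' ') = false := by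
      apply beq_eq_false_iff_ne.mpr
      intro he
      have := congrArg Char.toNat he
      rw [ht] at this
      have : c.toNat + 32 = 32 := this
      omega
    simp [d1, d2, e1, e2, e3]
  · have hd : (decide ('A' ≤ c) && decide (c ≤ 'Z')) = false := by
      rcases not_and_or.mp h with h' | h' <;> simp [h']
    simp [hd]

-- A's loop tests every original character for "alphabetic or space"
theorem loop_lower_eq_all (l : List Char) :
    acceptable_name_loop (PySem.Chars.lower l) = l.all (fun c => PySem.Chars.isalpha c || (c == ' ')) := by
  induction l with
  | nil => rfl
  | cons c rest ih =>
    simp only [PySem.Chars.lower, List.map_cons] at *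
    simp only [acceptable_name_loop, List.all_cons]
    rw [← lowerChar_cond c]
    by_cases h : ((decide ('a' ≤ PySem.Chars.lowerChar c) && decide (PySem.Chars.lowerChar c ≤ 'z')) || (PySem.Chars.lowerChar c == ' ')) = true
    · simp [h, ih]
    · simp only [Bool.not_eq_true] at h
      simp [h]

-- replacing " " by "" deletes exactly the space characters
theorem replace_go_space (l : List Char) :
    ∀ (fuel : Nat) (acc : List Char), l.length ≤ fuel →
      PySem.Chars.replace.go [' '] [] fuel l acc = acc.reverse ++ l.filter (fun c => !(c == ' ')) := by
  induction l with
  | nil => intro fuel acc _; cases fuel <;> simp [PySem.Chars.replace.go]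
  | cons c t ih =>
    intro fuel acc hlen
    obtain ⟨f, rfl⟩ : ∃ f, fuel = f + 1 := ⟨fuel - 1, by simp at hlen; omega⟩
    by_cases hc : c = ' '
    · subst hc
      have hpre : List.isPrefixOf [' '] (' ' :: t) = true := by simp [List.isPrefixOf]
      simp only [PySem.Chars.replace.go, hpre, if_true, List.length_cons] at *
      rw [show List.drop (List.length ([] : List Char) + 1) (' ' :: t) = t from rfl,
          show (([] : List Char).reverse ++ acc) = acc from rfl, ih f acc (by omega)]
      simp
    · have hpre : List.isPrefixOf [' '] (c :: t) = false := by
        simp only [List.isPrefixOf, Bool.and_true]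
        exact beq_eq_false_iff_ne.mpr (fun h => hc h.symm)
      simp only [PySem.Chars.replace.go, hpre, Bool.false_eq_true, if_false]
      rw [ih f (c :: acc) (by simp at hlen; omega)]
      simp [hc]

theorem replace_space (l : List Char) :
    PySem.Chars.replace l [' '] [] = l.filter (fun c => !(c == ' ')) := by
  rw [PySem.Chars.replace]
  simp only [List.isEmpty_cons, Bool.false_eq_true, if_false]
  exact replace_go_space l l.length [] le_rfl

-- all (alpha-or-space) equals all-alpha on the space-free residue
theorem all_filter_space (l : List Char) :
    l.all (fun c => PySem.Chars.isalpha c || (c == ' '))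
      = (l.filter (fun c => !(c == ' '))).all PySem.Chars.isalpha := by
  induction l with
  | nil => rfl
  | cons c t ih =>
    by_cases hc : c = ' '
    · subst hc; simp [ih]
    · have hc' : (c == ' ') = false := beq_eq_false_iff_ne.mpr hc
      simp [hc', ih]

-- ===== VERDICT (by name: the statement is the Claim_ definition above) =====
theorem acceptable_name_spec : Claim_equal_acceptable_name := by
  intro name _
  unfold Spec_acceptable_name acceptable_name acceptable_name_alt
  simp only [PySem.Str.toList_lower]
  rw [loop_lower_eq_all, all_filter_space]
  have hrep : (PySem.Str.replace name " " "").toList = name.toList.filter (fun c => !(c == ' ')) := by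
    rw [PySem.Str.toList_replace]
    exact replace_space name.toList
  have hbeq : (PySem.Str.replace name " " "" == "") = ((PySem.Str.replace name " " "").toList == ([] : List Char)) := by
    rw [Bool.eq_iff_iff]
    simp only [beq_iff_eq]
    constructor
    · intro h; rw [h]; rfl
    · intro h; exact String.toList_inj.mp (by simpa using h)
  rw [hbeq, PySem.Str.strIsalpha_eq, PySem.Chars.strIsalpha, hrep]
  cases hfe : name.toList.filter (fun c => !(c == ' ')) with
  | nil => simp
  | cons a b => simp
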